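-- pv_equiv track=rewrite | github.com/iccem/learn_data_structures_and_algorithms | 06_binary_search.py | right_bound
-- ===== SOURCE A (Python) =====
-- def right_bound(A:list, key:int):
--     left = -1
--     right = len(A)
--     while right - left > 1:
--         middle = (left + right) // 2
--         if A[middle] <= key:
--             left = middle
--         else:
--             right = middle
--     return right
-- ===== SOURCE B (Python) =====
-- def right_bound(A: list, key: int):
--     # Divide-and-conquer on slices: probe the middle element, then recurse
--     # into the half that still contains the boundary.
--     if not A:
--         return 0
--     m = (len(A) - 1) // 2
--     if A[m] <= key:
--         return m + 1 + right_bound(A[m + 1:], key)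
--     else:
--         return right_bound(A[:m], key)
-- ===== Notes on version B (the rewrite author's own statement) =====
-- stated objective: alternative
-- what changed: Replaced the imperative while-loop over exclusive (left,right) index bounds with a divide-and-conquer recursion on list slices that carries no bounds at all and adds the offset m+1 on the way back up; it probes the same middle elements, so it returns the same value on every input, sorted or not.
import Mathlib
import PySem

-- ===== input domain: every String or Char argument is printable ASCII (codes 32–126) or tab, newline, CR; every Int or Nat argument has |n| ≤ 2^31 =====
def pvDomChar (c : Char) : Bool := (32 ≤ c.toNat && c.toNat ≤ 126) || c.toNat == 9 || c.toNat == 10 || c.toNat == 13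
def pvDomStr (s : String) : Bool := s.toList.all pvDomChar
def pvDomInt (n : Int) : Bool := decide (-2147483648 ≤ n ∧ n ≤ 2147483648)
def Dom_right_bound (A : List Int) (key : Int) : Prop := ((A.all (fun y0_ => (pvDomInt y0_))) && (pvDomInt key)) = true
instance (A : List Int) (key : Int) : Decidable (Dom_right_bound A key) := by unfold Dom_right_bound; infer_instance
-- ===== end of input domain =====

-- B replaces A's imperative while-loop over (left,right) index bounds by a
-- divide-and-conquer recursion on list slices (objective: alternative, same value on every input).

-- ===== PORT A =====
-- while-loop over exclusive bounds left/right; A[middle] is always in range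
-- (-1 ≤ left < middle < right ≤ len), so the `.getD 0` none-branch (Python IndexError) is unreachable.
def rbLoop (A : List Int) (key : Int) (left right : Int) : Int :=
  if _h : right - left > 1 then
    if (PySem.List.pyGet? A (PySem.Int.floordiv (left + right) 2)).getD 0 ≤ key then
      rbLoop A key (PySem.Int.floordiv (left + right) 2) right
    else
      rbLoop A key left (PySem.Int.floordiv (left + right) 2)
  else right
termination_by (right - left).toNat
decreasing_by
  all_goals rw [PySem.Int.floordiv_eq_ediv_of_pos (by omega : (0:Int) < 2)]; omega

def right_bound (A : List Int) (key : Int) : Int :=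
  rbLoop A key (-1) (A.length : Int)

-- ===== PORT B =====
-- recursion on slices; `A[m]` with 0 ≤ m < len is List.getD, `A[m+1:]` = List.drop (m+1),
-- `A[:m]` = List.take m (all indices nonnegative and in range, so these are exact).
def right_bound_alt (A : List Int) (key : Int) : Int :=
  if h : A = [] then 0
  else
    let m := (A.length - 1) / 2
    if A.getD m 0 ≤ key then (m : Int) + 1 + right_bound_alt (A.drop (m + 1)) key
    else right_bound_alt (A.take m)  key
termination_by A.length
decreasing_by
  · simp only [List.length_drop]
    have : A.length ≠ 0 := fun hn => h (List.eq_nil_of_length_eq_zero hn)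
    omega
  · simp only [List.length_take]
    have : A.length ≠ 0 := fun hn => h (List.eq_nil_of_length_eq_zero hn)
    have := Nat.div_le_self (A.length - 1) 2
    omega

-- ===== PRECONDITION & SPEC =====
def Spec_right_bound (A : List Int) (key : Int) (out : Int) : Prop := out = right_bound_alt A key
instance (A : List Int) (key : Int) (out : Int) : Decidable (Spec_right_bound A key out) := by unfold Spec_right_bound; infer_instance

-- ===== CLAIM (what is proved, stated in full; the proofs are below) =====
def Claim_equal_right_bound : Prop := ∀ (A : List Int) (key : Int), Dom_right_bound A key → Spec_right_bound A key (right_bound A key)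

-- ===== LEMMAS AND PROOFS =====

-- The loop on bounds (left,right) computes left+1 plus B's answer on the slice A[left+1 : right].
lemma rbLoop_eq (A : List Int) (key : Int) :
    ∀ (n : ℕ) (left right : Int), (right - left).toNat ≤ n → -1 ≤ left → left < right →
      right ≤ (A.length : Int) →
      rbLoop A key left right
        = left + 1 + right_bound_alt ((A.drop (left + 1).toNat).take (right - left - 1).toNat) key := by
  intro n
  induction n with
  | zero => intro left right hfuel h1 h2 h3; omega
  | succ n ih =>
    intro left right hfuel h1 h2 h3
    by_cases hgt : right - left > 1
    · -- loop body runs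
      have hmid : PySem.Int.floordiv (left + right) 2 = (left + right) / 2 :=
        PySem.Int.floordiv_eq_ediv_of_pos (by omega)
      set mid := PySem.Int.floordiv (left + right) 2 with hmiddef
      have hlm : left < mid := by omega
      have hmr : mid < right := by omega
      set d := (left + 1).toNat with hd
      set L := (right - left - 1).toNat with hL
      have hdI : (d : Int) = left + 1 := by omega
      have hLI : (L : Int) = right - left - 1 := by omega
      set seg := (A.drop d).take L with hseg
      have hdL : (d : Int) + (L : Int) ≤ (A.length : Int) := by omega
      have hsegLen : seg.length = L := by
        simp only [hseg, List.length_take, List.length_drop]; omega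
      have hsegne : seg ≠ [] := by
        intro hnil
        have := hsegLen
        rw [hnil] at this
        simp at this
        omega
      set m := (seg.length - 1) / 2 with hm
      have hmL : m = (L - 1) / 2 := by rw [hm, hsegLen]
      have hmlt : m < L := by
        have := Nat.div_le_self (L - 1) 2
        omega
      have hmidm : mid = ((d + m : ℕ) : Int) := by
        have h2m : 2 * m ≤ L - 1 ∧ L - 1 ≤ 2 * m + 1 := by omega
        push_cast
        omega
      -- the two sides probe the same element
      have hprobe : (PySem.List.pyGet? A mid).getD 0 = seg.getD m 0 := by
        rw [hmidm, PySem.List.pyGet?_natCast]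
        rw [hseg, List.getD_eq_getElem?_getD]
        simp [hmlt, List.getElem?_drop]
      rw [rbLoop, dif_pos hgt, ← hmiddef]
      rw [right_bound_alt.eq_def]
      simp only [dif_neg hsegne]
      rw [← hm, hprobe]
      by_cases hcmp : seg.getD m 0 ≤ key
      · simp only [if_pos hcmp]
        have hrec := ih mid right (by omega) (by omega) hmr h3
        rw [hrec]
        have hslice : seg.drop (m + 1)
            = (A.drop (mid + 1).toNat).take (right - mid - 1).toNat := by
          rw [hseg, List.drop_take, List.drop_drop]
          have e1 : (mid + 1).toNat = d + (m + 1) := by omega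
          have e2 : (right - mid - 1).toNat = L - (m + 1) := by omega
          rw [e1, e2]
        rw [hslice]
        omega
      · simp only [if_neg hcmp]
        have hrec := ih left mid (by omega) h1 hlm (by omega)
        rw [hrec]
        have hslice : seg.take m = (A.drop (left + 1).toNat).take (mid - left - 1).toNat := by
          rw [hseg, List.take_take]
          have e1 : (mid - left - 1).toNat = m := by omega
          rw [e1, min_eq_left (le_of_lt hmlt), ← hd]
        rw [hslice]
    · -- loop exits: right = left + 1
      have hr : right = left + 1 := by omega
      rw [rbLoop, dif_neg hgt]
      have hL0 : (right - left - 1).toNat = 0 := by omega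
      rw [hL0]
      simp [right_bound_alt]
      omega

theorem right_bound_spec : Claim_equal_right_bound := by
  intro A key _
  unfold Spec_right_bound right_bound
  have h := rbLoop_eq A key ((A.length : Int) - (-1)).toNat (-1) (A.length : Int) (le_refl _)
    (by omega) (by omega) (le_refl _)
  simpa using h
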